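-- pv_equiv track=rewrite | github.com/Nicky027/advent-of-code | advent_of_code_2022/day_06/packets.py | get_start_of_packet_index
-- ===== SOURCE A (Python) =====
-- def get_start_of_packet_index(input: str) -> int:
--     for i in range(len(input) - 3):
--         sequence = input[i : (i + 4)]
--         symbols = []
--         unique_symbols_count = 0
--         for symbol in sequence:
--             if symbol not in symbols:
--                 symbols.append(symbol)
--                 unique_symbols_count += 1
--         if unique_symbols_count == 4:
--             return i + 4
--     return 0
-- ===== SOURCE B (Python) =====
-- def get_start_of_packet_index(input: str) -> int:
--     window = []  # current run of distinct consecutive characters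
--     for i, c in enumerate(input):
--         if c in window:
--             window = window[window.index(c) + 1:]
--         window.append(c)
--         if len(window) == 4:
--             return i + 1
--     return 0
-- ===== Notes on version B (the rewrite author's own statement) =====
-- stated objective: alternative
-- what changed: Replaces the per-start-index slice-and-dedup scan with a single sliding-window pass that maintains the current run of distinct consecutive characters, cutting the window at the previous occurrence of a repeated character and returning when it reaches length 4.
import Mathlib
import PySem

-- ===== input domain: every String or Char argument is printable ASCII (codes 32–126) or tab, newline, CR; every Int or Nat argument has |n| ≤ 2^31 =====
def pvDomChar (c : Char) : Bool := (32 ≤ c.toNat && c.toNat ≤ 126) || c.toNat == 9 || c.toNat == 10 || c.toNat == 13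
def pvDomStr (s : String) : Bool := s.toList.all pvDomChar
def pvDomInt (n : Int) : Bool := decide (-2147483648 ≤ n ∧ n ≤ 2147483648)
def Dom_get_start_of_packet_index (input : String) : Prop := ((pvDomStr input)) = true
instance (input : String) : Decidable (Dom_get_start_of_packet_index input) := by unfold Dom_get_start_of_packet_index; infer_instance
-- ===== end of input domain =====

-- B replaces A's per-start-index slice-and-dedup scan by one sliding-window pass that keeps the
-- current run of distinct consecutive characters (alternative decomposition, same asymptotic cost).

-- ===== PORT A =====
-- inner loop of A: fold over the 4-char sequence building (symbols, unique_symbols_count)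
def aInner (sequence : List Char) : List Char × Int :=
  sequence.foldl
    (fun st symbol => if symbol ∈ st.1 then st else (st.1 ++ [symbol], st.2 + 1))
    ([], 0)

-- 'for i in range(len(input) - 3): …; return 0'
def aLoop (s : List Char) : List Int → Int
  | [] => 0
  | i :: rest =>
    let sequence := PySem.List.slice s (some i) (some (i + 4))
    if (aInner sequence).2 == 4 then i + 4 else aLoop s rest

def get_start_of_packet_index (input : String) : Int :=
  aLoop input.toList (PySem.List.pyRange 0 (PySem.Str.len input - 3) 1)

-- ===== PORT B =====
-- 'for i, c in enumerate(input): …; return 0'; window[window.index(c) + 1:] is the slice;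
-- the '.getD 0' of index? is never reached with none because the slice is guarded by 'c in window'
def bLoop : List Char → Int → List Char → Int
  | [], _, _ => 0
  | c :: rest, i, window =>
    let window1 :=
      if c ∈ window then
        PySem.List.slice window (some (((PySem.List.index? window c).getD 0 : Int) + 1))
      else window
    let window2 := window1 ++ [c]
    if window2.length == 4 then i + 1 else bLoop rest (i + 1) window2

def get_start_of_packet_index_alt (input : String) : Int :=
  bLoop input.toList 0 []

-- ===== PRECONDITION & SPEC =====
def Spec_get_start_of_packet_index (input : String) (out : Int) : Prop := out = get_start_of_packet_index_alt input
instance (input : String) (out : Int) : Decidable (Spec_get_start_of_packet_index input out) := by unfold Spec_get_start_of_packet_index; infer_instance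

-- ===== CLAIM (what is proved, stated in full; the proofs are below) =====
def Claim_equal_get_start_of_packet_index : Prop := ∀ (input : String), Dom_get_start_of_packet_index input → Spec_get_start_of_packet_index input (get_start_of_packet_index input)

-- ===== LEMMAS AND PROOFS =====

-- the invariant of B's window: a maximal-length all-distinct suffix of the processed prefix
def MaxRun (p w : List Char) : Prop :=
  w <:+ p ∧ w.Nodup ∧ ∀ t, t <:+ p → t.Nodup → t.length ≤ w.length

-- A's inner dedup count: bounded by the length, with equality exactly on fresh nodup input
lemma aInner_count_le (l sy : List Char) (k : Int) :
    (l.foldl (fun st symbol => if symbol ∈ st.1 then st else (st.1 ++ [symbol], st.2 + 1)) (sy, k)).2 ≤ k + l.length ∧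
    ((l.foldl (fun st symbol => if symbol ∈ st.1 then st else (st.1 ++ [symbol], st.2 + 1)) (sy, k)).2 = k + l.length ↔
      l.Nodup ∧ ∀ x ∈ l, x ∉ sy) := by
  induction l generalizing sy k with
  | nil => simp
  | cons c l ih =>
    by_cases hc : c ∈ sy
    · have h := ih sy k
      simp only [List.foldl_cons, if_pos hc]
      constructor
      · refine le_trans h.1 (by simp only [List.length_cons]; push_cast; omega)
      · constructor
        · intro he
          exfalso
          have h1 := h.1
          rw [he] at h1
          simp only [List.length_cons] at h1
          push_cast at h1
          omega
        · rintro ⟨-, hall⟩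
          exact absurd hc (hall c (by simp))
    · have h := ih (sy ++ [c]) (k + 1)
      simp only [List.foldl_cons, if_neg hc]
      constructor
      · refine le_trans h.1 (by simp only [List.length_cons]; push_cast; omega)
      · rw [show k + ((c :: l).length : Int) = (k + 1) + l.length by simp only [List.length_cons]; push_cast; omega]
        rw [h.2]
        simp only [List.nodup_cons]
        constructor
        · rintro ⟨hnd, hall⟩
          have hcl : c ∉ l := fun hmem => by
            have := hall c hmem
            simp at this
          refine ⟨⟨hcl, hnd⟩, ?_⟩
          rintro x hx
          rcases List.mem_cons.mp hx with rfl | hx'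
          · exact hc
          · have := hall x hx'
            simp only [List.mem_append, List.mem_singleton] at this
            push_neg at this
            exact this.1
        · rintro ⟨⟨hcl, hnd⟩, hall⟩
          refine ⟨hnd, fun x hx => ?_⟩
          simp only [List.mem_append, List.mem_singleton]
          push_neg
          exact ⟨hall x (List.mem_cons.mpr (Or.inr hx)), fun he => hcl (he ▸ hx)⟩

lemma aInner_eq_four_iff (l : List Char) (hl : l.length = 4) :
    ((aInner l).2 = 4 ↔ l.Nodup) := by
  have h := aInner_count_le l [] 0
  unfold aInner
  constructor
  · intro he
    exact (h.2.mp (by rw [he, hl]; norm_num)).1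
  · intro hnd
    have := h.2.mpr ⟨hnd, by simp⟩
    rw [this, hl]; norm_num

-- nested suffixes of the same list
lemma suffix_of_suffix_le (t w p : List Char) (ht : t <:+ p) (hw : w <:+ p)
    (hle : t.length ≤ w.length) : t <:+ w := by
  obtain ⟨u, hu⟩ := ht
  obtain ⟨v, hv⟩ := hw
  have hvu : v.length ≤ u.length := by
    have := congrArg List.length (hu.trans hv.symm)
    simp only [List.length_append] at this
    omega
  refine ⟨u.drop v.length, ?_⟩
  have h2 : (u ++ t).drop v.length = u.drop v.length ++ t := by
    rw [List.drop_append, Nat.sub_eq_zero_of_le hvu, List.drop_zero]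
  calc u.drop v.length ++ t = (u ++ t).drop v.length := h2.symm
    _ = (v ++ w).drop v.length := by rw [hu, hv]
    _ = w := by simp

-- two suffixes of the same list with the same length are equal
lemma suffix_eq_of_length_eq (t w p : List Char) (ht : t <:+ p) (hw : w <:+ p)
    (hl : t.length = w.length) : t = w := by
  rw [List.suffix_iff_eq_drop] at ht hw
  rw [ht, hw, hl]

-- suffix transported across appending one element
lemma suffix_concat_concat (t0 p : List Char) (x c : Char)
    (h : t0 ++ [x] <:+ p ++ [c]) : x = c ∧ t0 <:+ p := by
  obtain ⟨u, hu⟩ := h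
  have hu' : (u ++ t0) ++ [x] = p ++ [c] := by rw [List.append_assoc]; exact hu
  have hx : x = c := by
    have := congrArg List.getLast? hu'
    simp only [List.getLast?_concat] at this
    exact Option.some_injective _ this
  have hp : u ++ t0 = p := by
    have := congrArg List.dropLast hu'
    simpa only [List.dropLast_concat] using this
  exact ⟨hx, ⟨u, hp⟩⟩

lemma suffix_append_singleton {l₁ l₂ : List Char} (c : Char) (h : l₁ <:+ l₂) :
    l₁ ++ [c] <:+ l₂ ++ [c] := by
  obtain ⟨u, hu⟩ := h
  exact ⟨u, by rw [← List.append_assoc, hu]⟩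

-- B's window-update step (definitionally the body of bLoop's window2)
def bStep (w : List Char) (c : Char) : List Char :=
  (if c ∈ w then
      PySem.List.slice w (some (((PySem.List.index? w c).getD 0 : Int) + 1))
    else w) ++ [c]

lemma bStep_mem (w : List Char) (c : Char) (hc : c ∈ w) :
    ∃ (k : Nat) (hlt : k < w.length), PySem.List.index? w c = some k ∧ w[k] = c ∧
      bStep w c = w.drop (k + 1) ++ [c] := by
  obtain ⟨k, hk⟩ := Option.isSome_iff_exists.mp ((PySem.List.index?_isSome_iff w c).mpr hc)
  obtain ⟨hlt, hget, -⟩ := PySem.List.getElem_of_index?_eq_some hk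
  refine ⟨k, hlt, hk, hget, ?_⟩
  unfold bStep
  rw [if_pos hc, hk]
  simp only [Option.getD_some]
  rw [show ((k : Int) + 1) = ((k + 1 : Nat) : Int) by push_cast; ring]
  rw [PySem.List.slice_from_natCast]

lemma bStep_length_le (w : List Char) (c : Char) : (bStep w c).length ≤ w.length + 1 := by
  by_cases hc : c ∈ w
  · obtain ⟨k, hk, -, -, he⟩ := bStep_mem w c hc
    rw [he]
    simp only [List.length_append, List.length_drop, List.length_cons, List.length_nil]
    omega
  · unfold bStep; rw [if_neg hc]
    simp

lemma bStep_suffix (p w : List Char) (c : Char) (hw : w <:+ p) : bStep w c <:+ p ++ [c] := by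
  by_cases hc : c ∈ w
  · obtain ⟨k, -, -, -, he⟩ := bStep_mem w c hc
    rw [he]
    exact suffix_append_singleton c ((List.drop_suffix (k+1) w).trans hw)
  · unfold bStep; rw [if_neg hc]
    exact suffix_append_singleton c hw

lemma bStep_maxRun (p w : List Char) (c : Char) (h : MaxRun p w) : MaxRun (p ++ [c]) (bStep w c) := by
  obtain ⟨hsuf, hnd, hmax⟩ := h
  refine ⟨bStep_suffix p w c hsuf, ?_, ?_⟩
  · -- the new window is nodup
    by_cases hc : c ∈ w
    · obtain ⟨k, hlt, hk, hget, he⟩ := bStep_mem w c hc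
      rw [he]
      have hcd : c ∉ w.drop (k + 1) := by
        intro hmem
        obtain ⟨m, hm, hgm⟩ := List.mem_iff_getElem.mp hmem
        have hm' : k + 1 + m < w.length := by
          simp only [List.length_drop] at hm; omega
        rw [List.getElem_drop] at hgm
        have heq : w[k + 1 + m]'hm' = w[k]'hlt := by rw [hgm, hget]
        have := (hnd.getElem_inj_iff).mp heq
        omega
      rw [List.nodup_append]
      refine ⟨(List.drop_sublist _ _).nodup hnd, List.nodup_singleton c, ?_⟩
      intro a ha b hb
      simp only [List.mem_singleton] at hb
      subst hb
      exact fun he => hcd (he ▸ ha)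
    · unfold bStep; rw [if_neg hc]
      rw [List.nodup_append]
      refine ⟨hnd, List.nodup_singleton c, ?_⟩
      intro a ha b hb
      simp only [List.mem_singleton] at hb
      subst hb
      exact fun he => hc (he ▸ ha)
  · -- maximality of the new window
    intro t htsuf htnd
    rcases List.eq_nil_or_concat t with rfl | ⟨t0, x, rfl⟩
    · simp
    · try simp only [List.concat_eq_append] at htsuf
      try simp only [List.concat_eq_append] at htnd
      obtain ⟨hx, ht0⟩ := suffix_concat_concat t0 p x c htsuf
      subst hx
      have ht0nd : t0.Nodup := (List.sublist_append_left t0 [x]).nodup htnd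
      have hct0 : x ∉ t0 := by
        rw [List.nodup_append] at htnd
        intro hmem
        exact htnd.2.2 x hmem x (by simp) rfl
      have hlen : t0.length ≤ w.length := hmax t0 ht0 ht0nd
      have ht0w : t0 <:+ w := suffix_of_suffix_le t0 w p ht0 hsuf hlen
      by_cases hc : x ∈ w
      · obtain ⟨k, hlt, hk, hget, he⟩ := bStep_mem w x hc
        rw [he]
        have hbound : t0.length ≤ w.length - (k + 1) := by
          by_contra hgt
          push_neg at hgt
          have hdk : w.length - t0.length ≤ k := by omega
          have hxmem : x ∈ t0 := by
            rw [List.suffix_iff_eq_drop] at ht0w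
            rw [ht0w]
            refine List.mem_iff_getElem.mpr ⟨k - (w.length - t0.length), ?_, ?_⟩
            · simp only [List.length_drop]; omega
            · rw [List.getElem_drop, ← hget]
              congr 1
              omega
          exact hct0 hxmem
        simp only [List.concat_eq_append, List.length_append, List.length_drop,
          List.length_cons, List.length_nil]
        omega
      · unfold bStep; rw [if_neg hc]
        simp only [List.concat_eq_append, List.length_append, List.length_cons, List.length_nil]
        omega

-- one unfolding of bLoop, phrased with bStep
lemma bLoop_cons (c : Char) (rest : List Char) (i : Int) (w : List Char) :
    bLoop (c :: rest) i w =
      if (bStep w c).length == 4 then i + 1 else bLoop rest (i + 1) (bStep w c) := rfl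

-- main alignment: B's remaining pass equals A's remaining window scan
lemma main_align (rest : List Char) : ∀ (p w : List Char), MaxRun p w → w.length ≤ 3 →
    bLoop rest (p.length : Int) w =
      aLoop (p ++ rest) (PySem.List.pyRange (max ((p.length : Int) - 3) 0) ((p.length : Int) + rest.length - 3) 1) := by
  induction rest with
  | nil =>
    intro p w _ _
    rw [PySem.List.pyRange_one_eq_nil (by simp only [List.length_nil, Nat.cast_zero]; omega)]
    simp [bLoop, aLoop]
  | cons c rest ih =>
    intro p w hmr hw3
    have hmr2 : MaxRun (p ++ [c]) (bStep w c) := bStep_maxRun p w c hmr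
    have hw2suf : bStep w c <:+ p ++ [c] := hmr2.1
    have hw2le4 : (bStep w c).length ≤ 4 := le_trans (bStep_length_le w c) (by omega)
    rw [bLoop_cons]
    by_cases hp3 : 3 ≤ p.length
    · -- the range is nonempty and its head checks the window ending at |p|
      have hab : (max ((p.length : Int) - 3) 0) = ((p.length - 3 : Nat) : Int) := by
        push_cast [hp3]
        omega
      have hcons : PySem.List.pyRange (max ((p.length : Int) - 3) 0) ((p.length : Int) + (c :: rest).length - 3) 1 =
          (max ((p.length : Int) - 3) 0) :: PySem.List.pyRange ((max ((p.length : Int) - 3) 0) + 1) ((p.length : Int) + (c :: rest).length - 3) 1 := by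
        refine PySem.List.pyRange_one_cons ?_
        simp only [List.length_cons]
        push_cast
        omega
      rw [hcons]
      simp only [aLoop]
      have hslice : PySem.List.slice (p ++ c :: rest) (some (max ((p.length : Int) - 3) 0))
          (some ((max ((p.length : Int) - 3) 0) + 4)) = (p ++ [c]).drop (p.length - 3) := by
        rw [hab, show (((p.length - 3 : Nat) : Int) + 4) = ((p.length + 1 : Nat) : Int) by push_cast; omega]
        rw [PySem.List.slice_natCast]
        rw [show p ++ c :: rest = (p ++ [c]) ++ rest by simp]
        rw [List.drop_append]
        have h1 : (p.length - 3) - (p ++ [c]).length = 0 := by simp; omega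
        rw [h1, List.drop_zero]
        have h2 : ((p ++ [c]).drop (p.length - 3)).length = 4 := by simp; omega
        rw [List.take_append]
        rw [show p.length + 1 - (p.length - 3) = 4 by omega]
        rw [h2, Nat.sub_self, List.take_zero, List.append_nil]
        exact List.take_of_length_le (le_of_eq h2)
      have hWlen : ((p ++ [c]).drop (p.length - 3)).length = 4 := by simp; omega
      have hWsuf : (p ++ [c]).drop (p.length - 3) <:+ p ++ [c] := List.drop_suffix _ _
      -- the two tests agree
      have hiff : (aInner ((p ++ [c]).drop (p.length - 3))).2 = 4 ↔ (bStep w c).length = 4 := by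
        rw [aInner_eq_four_iff _ hWlen]
        constructor
        · intro hnd
          have h4 := hmr2.2.2 _ hWsuf hnd
          omega
        · intro h4
          have := suffix_eq_of_length_eq _ _ _ hWsuf hw2suf (by rw [hWlen, h4])
          rw [this]
          exact hmr2.2.1
      rw [hslice]
      simp only [beq_iff_eq]
      by_cases hgood : (bStep w c).length = 4
      · rw [if_pos hgood, if_pos (hiff.mpr hgood)]
        rw [hab]
        omega
      · rw [if_neg hgood, if_neg (fun h => hgood (hiff.mp h))]
        have hrec := ih (p ++ [c]) (bStep w c) hmr2 (by omega)
        simp only [List.length_append, List.length_cons, List.length_nil] at hrec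
        rw [show ((p.length : Int) + 1) = (((p.length + 1 : Nat)) : Int) by push_cast; ring]
        rw [hrec]
        rw [show (p ++ [c]) ++ rest = p ++ c :: rest by simp]
        congr 2
        · rw [hab]; push_cast; omega
        · simp only [List.length_cons]; push_cast; omega
    · -- fewer than 3 characters processed: B cannot return, A's range does not move
      push_neg at hp3
      have hlen3 : (bStep w c).length ≤ 3 := by
        have := hw2suf.length_le
        simp only [List.length_append, List.length_cons, List.length_nil] at this
        omega
      simp only [beq_iff_eq]
      rw [if_neg (by omega)]
      have hrec := ih (p ++ [c]) (bStep w c) hmr2 hlen3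
      simp only [List.length_append, List.length_cons, List.length_nil] at hrec
      rw [show ((p.length : Int) + 1) = (((p.length + 1 : Nat)) : Int) by push_cast; ring]
      rw [hrec]
      rw [show (p ++ [c]) ++ rest = p ++ c :: rest by simp]
      congr 2
      · push_cast; omega
      · simp only [List.length_cons]; push_cast; omega

-- ===== VERDICT (by name: the statement is the Claim_ definition above) =====
theorem get_start_of_packet_index_spec : Claim_equal_get_start_of_packet_index := by
  intro input _
  unfold Spec_get_start_of_packet_index get_start_of_packet_index get_start_of_packet_index_alt
  have h := main_align input.toList [] [] ⟨List.nil_suffix, List.nodup_nil, by simp⟩ (by simp)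
  simp only [List.length_nil, List.nil_append, Nat.cast_zero] at h
  norm_num at h
  have hl : PySem.Str.len input = (input.toList.length : Int) := by
    rw [← PySem.Chars.len_eq]; rfl
  rw [hl]
  exact h.symm
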